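-- pv_equiv track=rewrite | github.com/xmzDesign/santong-skill | by-harness/scripts/ensure_task_branch.py | pick_feature_by_prompt
-- ===== SOURCE A (Python) =====
-- from typing import Any
--
-- def to_priority(value: Any) -> int:
--     try:
--         return int(value)
--     except (TypeError, ValueError):
--         return 10**9
--
-- def sort_key(feature: dict[str, Any]) -> tuple[int, str]:
--     return (to_priority(feature.get("priority")), str(feature.get("id", "")))
--
-- def pick_feature_by_prompt(
--     features: list[dict[str, Any]], task_ids: list[str], feat_ids: list[str]
-- ) -> dict[str, Any] | None:
--     for task_id in task_ids:
--         matched = [f for f in features if str(f.get("task_id", "")).upper() == task_id]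
--         if matched:
--             return sorted(matched, key=sort_key)[0]
--
--     for feat_id in feat_ids:
--         matched = [f for f in features if str(f.get("id", "")).lower() == feat_id]
--         if matched:
--             return sorted(matched, key=sort_key)[0]
--     return None
-- ===== SOURCE B (Python) =====
-- def _first_index(ids):
--     pos = {}
--     for i, x in enumerate(ids):
--         if x not in pos:
--             pos[x] = i
--     return pos
--
--
-- def _argmin(features, pos, get_id):
--     best = None  # (key, feature) with key = (position, priority, id)
--     for f in features:
--         p = pos.get(get_id(f))
--         if p is None:
--             continue
--         try:
--             pr = int(f.get("priority"))
--         except (TypeError, ValueError):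
--             pr = 10**9
--         k = (p, pr, str(f.get("id", "")))
--         if best is None or k < best[0]:
--             best = (k, f)
--     return None if best is None else best[1]
--
--
-- def pick_feature_by_prompt(features, task_ids, feat_ids):
--     hit = _argmin(features, _first_index(task_ids),
--                   lambda f: str(f.get("task_id", "")).upper())
--     if hit is not None:
--         return hit
--     return _argmin(features, _first_index(feat_ids),
--                    lambda f: str(f.get("id", "")).lower())
-- ===== Notes on version B (the rewrite author's own statement) =====
-- stated objective: faster
-- what changed: Instead of filtering and stably sorting the features once per candidate id, B builds a first-occurrence position index over the ids and makes a single argmin pass over features with the composite key (position, priority, id) and strict less-than, so the earliest feature wins ties.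
import Mathlib
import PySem

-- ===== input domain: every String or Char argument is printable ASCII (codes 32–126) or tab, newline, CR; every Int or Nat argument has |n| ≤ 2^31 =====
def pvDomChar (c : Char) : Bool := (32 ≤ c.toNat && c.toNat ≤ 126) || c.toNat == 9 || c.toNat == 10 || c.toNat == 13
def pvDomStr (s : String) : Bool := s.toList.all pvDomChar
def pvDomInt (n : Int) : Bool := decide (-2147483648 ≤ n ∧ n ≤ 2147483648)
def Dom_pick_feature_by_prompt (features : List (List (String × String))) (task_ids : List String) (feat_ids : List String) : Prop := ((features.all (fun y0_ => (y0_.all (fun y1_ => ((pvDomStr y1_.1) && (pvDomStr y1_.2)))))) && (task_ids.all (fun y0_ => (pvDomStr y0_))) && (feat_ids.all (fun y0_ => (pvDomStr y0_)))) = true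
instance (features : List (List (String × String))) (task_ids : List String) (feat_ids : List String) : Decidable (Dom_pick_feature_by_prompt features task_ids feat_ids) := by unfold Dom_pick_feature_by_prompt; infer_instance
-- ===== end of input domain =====

-- B replaces A's per-id filter-and-stable-sort passes by one first-occurrence position index over the ids
-- plus a single strict-< argmin pass over the features (objective: faster, measured).

-- ===== PORT A =====

-- to_priority(value): int(value), or 10**9 on TypeError (missing key -> None) / ValueError
def to_priority (value : Option String) : Int :=
  match value with
  | none => 1000000000
  | some s =>
    match PySem.Int.ofStr? s with
    | none => 1000000000
    | some n => n

-- sort_key(feature) = (to_priority(feature.get("priority")), str(feature.get("id", "")))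
def sort_key1 (f : List (String × String)) : Int :=
  to_priority (PySem.Dict.get? ⟨f⟩ "priority")

def sort_key2 (f : List (String × String)) : String :=
  PySem.Dict.getD ⟨f⟩ "id" ""

-- one 'for id in ids: matched = [...]; if matched: return sorted(matched, key=sort_key)[0]' loop;
-- A's two loops are this same code with the two different id extractors
def pickLoopA (features : List (List (String × String)))
    (getKey : List (String × String) → String) : List String → Option (List (String × String))
  | [] => none
  | tid :: rest =>
    let matched := features.filter (fun f => getKey f == tid)
    if matched.isEmpty then pickLoopA features getKey rest
    else (PySem.List.sorted2 matched sort_key1 sort_key2).head?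

def pick_feature_by_prompt (features : List (List (String × String))) (task_ids : List String) (feat_ids : List String) : Option (List (String × String)) :=
  match pickLoopA features (fun f => PySem.Str.upper (PySem.Dict.getD ⟨f⟩ "task_id" "")) task_ids with
  | some f => some f
  | none => pickLoopA features (fun f => PySem.Str.lower (PySem.Dict.getD ⟨f⟩ "id" "")) feat_ids

-- ===== PORT B =====

-- _first_index(ids): dict mapping each id to the index of its first occurrence
def alt_first_index (ids : List String) : PySem.Dict String Int :=
  (PySem.List.enumerate ids).foldl
    (fun pos ix => if pos.contains ix.2 then pos else pos.insert ix.2 ix.1) PySem.Dict.empty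

-- the 'try: int(...) except: 10**9' priority of a feature
def alt_prio (f : List (String × String)) : Int :=
  match PySem.Dict.get? ⟨f⟩ "priority" with
  | none => 1000000000
  | some s =>
    match PySem.Int.ofStr? s with
    | none => 1000000000
    | some n => n

-- Python's lexicographic '<' on the 3-tuple (position, priority, id)
def alt_key_lt (a b : Int × Int × String) : Bool :=
  a.1 < b.1 || (a.1 == b.1 && (a.2.1 < b.2.1 || (a.2.1 == b.2.1 && decide (a.2.2 < b.2.2))))

-- _argmin(features, pos, get_id): single pass keeping the best (key, feature); strict < so the first wins
def alt_argmin (features : List (List (String × String))) (pos : PySem.Dict String Int)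
    (getId : List (String × String) → String) : Option (List (String × String)) :=
  let best := features.foldl (fun best f =>
    match pos.get? (getId f) with
    | none => best
    | some p =>
      let k : Int × Int × String := (p, alt_prio f, PySem.Dict.getD ⟨f⟩ "id" "")
      match best with
      | none => some (k, f)
      | some b => if alt_key_lt k b.1 then some (k, f) else some b) none
  best.map (·.2)

def pick_feature_by_prompt_alt (features : List (List (String × String))) (task_ids : List String) (feat_ids : List String) : Option (List (String × String)) :=
  match alt_argmin features (alt_first_index task_ids)
      (fun f => PySem.Str.upper (PySem.Dict.getD ⟨f⟩ "task_id" "")) with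
  | some f => some f
  | none => alt_argmin features (alt_first_index feat_ids)
      (fun f => PySem.Str.lower (PySem.Dict.getD ⟨f⟩ "id" ""))

-- ===== PRECONDITION & SPEC =====
def Spec_pick_feature_by_prompt (features : List (List (String × String))) (task_ids : List String) (feat_ids : List String) (out : Option (List (String × String))) : Prop := out = pick_feature_by_prompt_alt features task_ids feat_ids
instance (features : List (List (String × String))) (task_ids : List String) (feat_ids : List String) (out : Option (List (String × String))) : Decidable (Spec_pick_feature_by_prompt features task_ids feat_ids out) := by unfold Spec_pick_feature_by_prompt; infer_instance

-- ===== CLAIM (what is proved, stated in full; the proofs are below) =====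
def Claim_equal_pick_feature_by_prompt : Prop := ∀ (features : List (List (String × String))) (task_ids : List String) (feat_ids : List String), Dom_pick_feature_by_prompt features task_ids feat_ids → Spec_pick_feature_by_prompt features task_ids feat_ids (pick_feature_by_prompt features task_ids feat_ids)

-- ===== LEMMAS AND PROOFS =====

theorem fi_aux (ids : List String) (v : String) : ∀ (n : Int) (d : PySem.Dict String Int),
    ((PySem.List.enumerate ids n).foldl
      (fun pos ix => if pos.contains ix.2 then pos else pos.insert ix.2 ix.1) d).get? v =
      match d.get? v with
      | some w => some w
      | none => (PySem.List.index? ids v).map (fun k => (k : Int) + n) := by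
  induction ids with
  | nil => intro n d; simp [PySem.List.enumerate_nil, PySem.List.index?]
           cases d.get? v <;> simp
  | cons x t ih =>
    intro n d
    rw [PySem.List.enumerate_cons, List.foldl_cons]
    by_cases hc : d.contains x
    · simp only [hc, if_true]
      rw [ih]
      by_cases hv : v = x
      · subst hv
        have : (d.get? v).isSome := by rw [← PySem.Dict.contains_eq_isSome_get?]; exact hc
        obtain ⟨w, hw⟩ := Option.isSome_iff_exists.mp this
        simp [hw]
      · rw [PySem.List.index?_cons_of_ne _ (fun h => hv h.symm)]
        cases hdg : d.get? v <;> cases hix : PySem.List.index? t v <;> simp [hdg, hix]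
        push_cast; ring
    · simp only [hc, if_false]
      rw [ih]
      by_cases hv : v = x
      · subst hv
        have hdg : d.get? v = none := by
          cases h : d.get? v with
          | none => rfl
          | some w => exact absurd (by rw [PySem.Dict.contains_eq_isSome_get?, h]; rfl) hc
        rw [PySem.List.index?_cons_self]
        simp [PySem.Dict.get?_insert_self, hdg]
      · rw [PySem.List.index?_cons_of_ne _ (fun h => hv h.symm)]
        cases hdg : d.get? v <;> cases hix : PySem.List.index? t v <;>
          simp [PySem.Dict.get?_insert_of_ne, hv, hdg, hix]
        push_cast; ring

theorem alt_first_index_get? (ids : List String) (v : String) :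
    (alt_first_index ids).get? v = (PySem.List.index? ids v).map (fun k => (k : Int)) := by
  unfold alt_first_index
  rw [fi_aux]
  cases hix : PySem.List.index? ids v <;> simp [PySem.Dict.get?_empty, hix]

def candK (getKey : List (String × String) → String) (ids : List String)
    (f : List (String × String)) : Option (Int × Int × String) :=
  (PySem.List.index? ids (getKey f)).map (fun p => ((p : Int), sort_key1 f, sort_key2 f))

def mstep (c : List (String × String) → Option (Int × Int × String))
    (best : Option ((Int × Int × String) × List (String × String)))
    (f : List (String × String)) : Option ((Int × Int × String) × List (String × String)) :=
  match c f with
  | none => best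
  | some k =>
    match best with
    | none => some (k, f)
    | some b => if alt_key_lt k b.1 then some (k, f) else some b

theorem alt_prio_eq (f : List (String × String)) : alt_prio f = sort_key1 f := rfl

theorem alt_argmin_eq (features : List (List (String × String))) (ids : List String)
    (u : List (String × String) → String) :
    alt_argmin features (alt_first_index ids) u =
      (features.foldl (mstep (candK u ids)) none).map (·.2) := by
  show Option.map (fun x => x.2) (features.foldl (fun best f =>
    match (alt_first_index ids).get? (u f) with
    | none => best
    | some p =>
      let k : Int × Int × String := (p, alt_prio f, PySem.Dict.getD ⟨f⟩ "id" "")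
      match best with
      | none => some (k, f)
      | some b => if alt_key_lt k b.1 then some (k, f) else some b) none) = _
  have h : ∀ acc f, f ∈ features →
      (fun best f =>
        match (alt_first_index ids).get? (u f) with
        | none => best
        | some p =>
          let k : Int × Int × String := (p, alt_prio f, PySem.Dict.getD ⟨f⟩ "id" "")
          match best with
          | none => some (k, f)
          | some b => if alt_key_lt k b.1 then some (k, f) else some b) acc f
      = mstep (candK u ids) acc f := by
    intro acc f _
    beta_reduce
    rw [alt_first_index_get?]
    unfold mstep candK
    cases hix : PySem.List.index? ids (u f) <;> simp [alt_prio_eq, sort_key2]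
  exact congrArg (Option.map (fun x => x.2)) (PySem.List.foldl_congr_mem features _ _ none h)

def m2step (m : Option (List (String × String))) (x : List (String × String)) :
    Option (List (String × String)) :=
  match m with
  | none => some x
  | some m' =>
    if (decide (sort_key1 x < sort_key1 m') ||
        !decide (sort_key1 m' < sort_key1 x) && decide (sort_key2 x < sort_key2 m')) then some x
    else some m'

theorem head_insertfold (bf : List (String × String) → List (String × String) → Bool)
    (xs : List (List (String × String))) : ∀ (acc : List (List (String × String))),
    (xs.foldl (fun a x => PySem.List.insertBy bf x a) acc).head? =
      xs.foldl (fun m x =>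
        match m with
        | none => some x
        | some m' => if bf x m' then some x else some m') acc.head? := by
  induction xs with
  | nil => intro acc; rfl
  | cons x t ih =>
    intro acc
    rw [List.foldl_cons, List.foldl_cons, ih]
    congr 1
    cases acc with
    | nil => rfl
    | cons y ys =>
      show (PySem.List.insertBy bf x (y :: ys)).head? = _
      rw [PySem.List.insertBy]
      by_cases hb : bf x y <;> simp [hb]

theorem sorted2_head (xs : List (List (String × String))) :
    (PySem.List.sorted2 xs sort_key1 sort_key2).head? = xs.foldl m2step none := by
  rw [PySem.List.sorted2]
  simp only [if_neg (by decide : ¬(false = true))]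
  rw [head_insertfold]
  rfl

def shiftK (k : Int × Int × String) : Int × Int × String := (k.1 + 1, k.2)

def shiftC (c : (Int × Int × String) × List (String × String)) :
    (Int × Int × String) × List (String × String) := (shiftK c.1, c.2)

theorem lt_shift (a b : Int × Int × String) : alt_key_lt (shiftK a) (shiftK b) = alt_key_lt a b := by
  have h : (a.1 + 1 == b.1 + 1) = (a.1 == b.1) := by
    by_cases h : a.1 = b.1 <;> simp [h] <;> omega
  simp only [alt_key_lt, shiftK, h]
  congr 1
  exact decide_eq_decide.mpr (by omega)

theorem klt_00 (a a' : Int) (b b' : String) :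
    alt_key_lt (0, a, b) (0, a', b') =
      (decide (a < a') || !decide (a' < a) && decide (b < b')) := by
  rcases lt_trichotomy a a' with h | h | h
  · simp [alt_key_lt, h, ne_of_gt h, le_of_lt h, not_lt.mpr (le_of_lt h)]
  · subst h; simp [alt_key_lt]
  · simp [alt_key_lt, not_lt.mpr (le_of_lt h), (ne_of_lt h).symm, h]

theorem klt_0hi (k : Int × Int × String) (a : Int) (b : String) (hk : 1 ≤ k.1) :
    alt_key_lt (0, a, b) k = true := by
  simp [alt_key_lt]; left; omega

theorem klt_hi0 (k : Int × Int × String) (a : Int) (b : String) (hk : 1 ≤ k.1) :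
    alt_key_lt k (0, a, b) = false := by
  simp [alt_key_lt]
  constructor
  · omega
  · intro h; omega

theorem fold_none (fs : List (List (String × String)))
    (c : List (String × String) → Option (Int × Int × String))
    (h : ∀ f ∈ fs, c f = none) (b : Option ((Int × Int × String) × List (String × String))) :
    fs.foldl (mstep c) b = b := by
  rw [PySem.List.foldl_congr_mem fs _ (fun acc _ => acc) b
    (by intro acc f hf; simp [mstep, h f hf]), PySem.List.foldl_ignore]

theorem shift_fold (fs : List (List (String × String)))
    (c : List (String × String) → Option (Int × Int × String)) :
    ∀ (acc : Option ((Int × Int × String) × List (String × String))),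
    fs.foldl (mstep (fun f => (c f).map shiftK)) (acc.map shiftC) =
      (fs.foldl (mstep c) acc).map shiftC := by
  induction fs with
  | nil => intro acc; rfl
  | cons f fs' ih =>
    intro acc
    rw [List.foldl_cons, List.foldl_cons]
    have hstep : mstep (fun f => (c f).map shiftK) (acc.map shiftC) f = (mstep c acc f).map shiftC := by
      unfold mstep
      cases hcf : c f with
      | none => simp [hcf]
      | some k =>
        simp only [hcf, Option.map_some]
        cases acc with
        | none => simp [shiftC]
        | some b =>
          simp only [Option.map_some]
          rw [show (shiftC b).1 = shiftK b.1 from rfl, lt_shift]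
          by_cases hb : alt_key_lt k b.1 <;> simp [hb, shiftC]
    rw [hstep, ih]

theorem mstep_none {c : List (String × String) → Option (Int × Int × String)}
    {f : List (String × String)} (h : c f = none) (b) : mstep c b f = b := by
  unfold mstep; rw [h]

theorem mstep_some_none {c : List (String × String) → Option (Int × Int × String)}
    {f : List (String × String)} {k} (h : c f = some k) : mstep c none f = some (k, f) := by
  unfold mstep; rw [h]

theorem mstep_some_some {c : List (String × String) → Option (Int × Int × String)}
    {f : List (String × String)} {k} (h : c f = some k) (b) :
    mstep c (some b) f = if alt_key_lt k b.1 then some (k, f) else some b := by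
  unfold mstep; rw [h]

theorem m2step_none (x : List (String × String)) : m2step none x = some x := rfl

theorem m2step_some (m' x : List (String × String)) :
    m2step (some m') x =
      if (decide (sort_key1 x < sort_key1 m') ||
          !decide (sort_key1 m' < sort_key1 x) && decide (sort_key2 x < sort_key2 m')) then some x
      else some m' := rfl

theorem S_lo (c : List (String × String) → Option (Int × Int × String))
    (lo : List (String × String) → Bool)
    (hlo : ∀ f, lo f = true → c f = some (0, sort_key1 f, sort_key2 f))
    (hhi : ∀ f, lo f = false → c f = none ∨ ∃ k, c f = some k ∧ 1 ≤ k.1) :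
    ∀ (fs : List (List (String × String))) (m : List (String × String)),
    (fs.foldl (mstep c) (some ((0, sort_key1 m, sort_key2 m), m))).map (·.2) =
      (fs.filter lo).foldl m2step (some m) := by
  intro fs
  induction fs with
  | nil => intro m; rfl
  | cons f fs' ih =>
    intro m
    rw [List.foldl_cons]
    by_cases hf : lo f
    · rw [List.filter_cons_of_pos hf, List.foldl_cons,
        mstep_some_some (hlo f hf), m2step_some, klt_00]
      by_cases hcond : (decide (sort_key1 f < sort_key1 m) ||
          !decide (sort_key1 m < sort_key1 f) && decide (sort_key2 f < sort_key2 m)) = true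
      · rw [hcond]; simp only [if_true]; exact ih f
      · rw [Bool.not_eq_true] at hcond
        rw [hcond]; simp only [Bool.false_eq_true, if_false]; exact ih m
    · rw [List.filter_cons_of_neg (by simp [hf])]
      have step_eq : mstep c (some ((0, sort_key1 m, sort_key2 m), m)) f =
          some ((0, sort_key1 m, sort_key2 m), m) := by
        rcases hhi f (by simp [hf]) with h | ⟨k, hk, hk1⟩
        · exact mstep_none h _
        · rw [mstep_some_some hk, klt_hi0 k _ _ hk1]
          simp
      rw [step_eq]
      exact ih m

theorem S_hi (c : List (String × String) → Option (Int × Int × String))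
    (lo : List (String × String) → Bool)
    (hlo : ∀ f, lo f = true → c f = some (0, sort_key1 f, sort_key2 f))
    (hhi : ∀ f, lo f = false → c f = none ∨ ∃ k, c f = some k ∧ 1 ≤ k.1) :
    ∀ (fs : List (List (String × String)))
      (b : Option ((Int × Int × String) × List (String × String))),
    (b = none ∨ ∃ cc, b = some cc ∧ 1 ≤ cc.1.1) → (fs.filter lo) ≠ [] →
    (fs.foldl (mstep c) b).map (·.2) = (fs.filter lo).foldl m2step none := by
  intro fs
  induction fs with
  | nil => intro b _ hne; exact absurd rfl hne
  | cons f fs' ih =>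
    intro b hb hne
    rw [List.foldl_cons]
    by_cases hf : lo f
    · rw [List.filter_cons_of_pos hf, List.foldl_cons]
      have hstep : mstep c b f = some ((0, sort_key1 f, sort_key2 f), f) := by
        rcases hb with rfl | ⟨cc, rfl, hcc⟩
        · exact mstep_some_none (hlo f hf)
        · rw [mstep_some_some (hlo f hf), klt_0hi cc.1 _ _ hcc]
          simp
      rw [hstep, m2step_none]
      exact S_lo c lo hlo hhi fs' f
    · rw [List.filter_cons_of_neg (by simp [hf])] at hne ⊢
      have hb' : mstep c b f = none ∨ ∃ cc, mstep c b f = some cc ∧ 1 ≤ cc.1.1 := by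
        rcases hhi f (by simp [hf]) with h | ⟨k, hk, hk1⟩
        · rw [mstep_none h]; exact hb
        · rcases hb with rfl | ⟨cc, rfl, hcc⟩
          · rw [mstep_some_none hk]
            exact Or.inr ⟨(k, f), rfl, hk1⟩
          · rw [mstep_some_some hk]
            by_cases hc : alt_key_lt k cc.1 = true
            · rw [hc]; simp only [if_true]
              exact Or.inr ⟨(k, f), rfl, hk1⟩
            · rw [Bool.not_eq_true] at hc
              rw [hc]; simp only [Bool.false_eq_true, if_false]
              exact Or.inr ⟨cc, rfl, hcc⟩
      exact ih (mstep c b f) hb' hne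

theorem phase (features : List (List (String × String)))
    (u : List (String × String) → String) : ∀ (ids : List String),
    pickLoopA features u ids = (features.foldl (mstep (candK u ids)) none).map (·.2) := by
  intro ids
  induction ids with
  | nil =>
    rw [pickLoopA, fold_none features _ (by intro f _; simp [candK, PySem.List.index?])]
    rfl
  | cons t rest ih =>
    rw [pickLoopA]
    by_cases hm : (features.filter (fun f => u f == t)) = []
    · simp only [hm, List.isEmpty_nil, if_true]
      have hnot : ∀ f ∈ features, ¬(u f == t) = true := by
        intro f hf hft
        exact absurd (List.mem_filter.mpr ⟨hf, hft⟩ : f ∈ features.filter (fun f => u f == t)) (by simp [hm])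
      have hshift : ∀ acc f, f ∈ features →
          mstep (candK u (t :: rest)) acc f =
            mstep (fun f => (candK u rest f).map shiftK) acc f := by
        intro acc f hf
        have hne : u f ≠ t := by
          intro h; exact hnot f hf (by simp [h])
        have hc : candK u (t :: rest) f = (candK u rest f).map shiftK := by
          unfold candK
          rw [PySem.List.index?_cons_of_ne _ (Ne.symm hne)]
          cases hix : PySem.List.index? rest (u f) with
          | none => rfl
          | some p => simp [shiftK]
        unfold mstep
        rw [hc]
      rw [ih, PySem.List.foldl_congr_mem features _ _ none hshift]
      have hs := shift_fold features (candK u rest) none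
      simp only [Option.map_none] at hs
      rw [hs]
      cases features.foldl (mstep (candK u rest)) none <;> rfl
    · rw [if_neg (by simpa using hm)]
      rw [sorted2_head]
      refine (S_hi (candK u (t :: rest)) (fun f => u f == t) ?_ ?_ features none (Or.inl rfl) hm).symm
      · intro f hf
        have : u f = t := by simpa using hf
        unfold candK
        rw [this, PySem.List.index?_cons_self]
        simp
      · intro f hf
        have hne : u f ≠ t := by simpa using hf
        unfold candK
        rw [PySem.List.index?_cons_of_ne _ (Ne.symm hne)]
        cases hix : PySem.List.index? rest (u f) with
        | none => exact Or.inl rfl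
        | some p =>
          refine Or.inr ⟨_, rfl, ?_⟩
          simp only []
          push_cast
          omega

theorem main_eq (features : List (List (String × String))) (task_ids feat_ids : List String) :
    pick_feature_by_prompt features task_ids feat_ids =
      pick_feature_by_prompt_alt features task_ids feat_ids := by
  unfold pick_feature_by_prompt pick_feature_by_prompt_alt
  rw [alt_argmin_eq, alt_argmin_eq, ← phase, ← phase]

-- ===== VERDICT (by name: the statement is the Claim_ definition above) =====
theorem pick_feature_by_prompt_spec : Claim_equal_pick_feature_by_prompt := by
  intro features task_ids feat_ids _
  exact main_eq features task_ids feat_ids
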